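-- pv_equiv track=rewrite | github.com/abelcarreras/VQEmulti | vqemulti/utils.py | bk_to_fock
-- ===== SOURCE A (Python) =====
-- def should_include_in_parity(qubit_idx, fermion_idx):
--     """
--     Determine if fermion_idx should be included in the parity calculation for qubit_idx.
--     This implements the Fenwick tree structure for BK transformation.
--     """
--     # Convert to 1-indexed for easier bit manipulation
--     i = qubit_idx + 1
--     j = fermion_idx + 1
--
--     # Check if j is in the "update set" of i in Fenwick tree
--     # This happens when j is in the subtree rooted at i
--
--     # First check: j must be <= i
--     if j > i:
--         return False
--
--     # Get the binary representations
--     # For BK transformation, we need to check if j is in the Fenwick update set of i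
--
--     # Find the rightmost set bit of i (this determines the range)
--     rightmost_bit = i & (-i)  # LSB operation
--
--     # j is included if it's in the range [i - rightmost_bit + 1, i]
--     return (i - rightmost_bit + 1) <= j <= i
--
-- def bk_to_fock(bk_vector):
--     """
--     Convert Bravyi-Kitaev encoded vector back to Fock state vector.
--
--     This is the inverse of the BK transformation. We reconstruct the original
--     occupation numbers by using the Fenwick tree structure in reverse.
--
--     :param bk_vector: List representing BK encoded state
--     :return: List of occupation numbers (0 or 1) in Fock basis
--     """
--     n = len(bk_vector)
--     fock_vector = [0] * n
--
--     # Process from left to right (lowest to highest index)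
--     for i in range(n):
--         # To find fock_vector[i], we need to determine what value
--         # would produce the observed bk_vector[i] given the current
--         # partial fock_vector
--
--         # Calculate what the parity should be at position i
--         # based on the already determined fock values
--         current_parity = 0
--
--         # Calculate parity from fermionic modes that contribute to qubit i
--         # but exclude the current mode i itself
--         for j in range(i):  # Only consider already processed modes
--             if should_include_in_parity(i, j):
--                 current_parity ^= fock_vector[j]
--
--         # The occupation at position i is determined by:
--         # bk_vector[i] = current_parity XOR fock_vector[i]
--         # Therefore: fock_vector[i] = bk_vector[i] XOR current_parity
--         fock_vector[i] = bk_vector[i] ^ current_parity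
--
--     return fock_vector
-- ===== SOURCE B (Python) =====
-- def bk_to_fock(bk_vector):
--     # Prefix-XOR: the parity set for qubit i is the contiguous block
--     # [(i+1) - lsb(i+1), i), so each entry is computed in O(1).
--     fock_vector = []
--     prefix = [0]  # prefix[k] = XOR of fock_vector[0..k-1]
--     for i, b in enumerate(bk_vector):
--         m = i + 1
--         lo = m - (m & -m)
--         f = b ^ prefix[i] ^ prefix[lo]
--         fock_vector.append(f)
--         prefix.append(prefix[i] ^ f)
--     return fock_vector
-- ===== Notes on version B (the rewrite author's own statement) =====
-- stated objective: faster
-- what changed: Replaces the per-qubit inner scan over all earlier modes (Fenwick membership test per pair) by a running prefix-XOR array: the parity set of qubit i is the contiguous block [(i+1)-lsb(i+1), i), so each parity is one XOR of two prefix values.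
import Mathlib
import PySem

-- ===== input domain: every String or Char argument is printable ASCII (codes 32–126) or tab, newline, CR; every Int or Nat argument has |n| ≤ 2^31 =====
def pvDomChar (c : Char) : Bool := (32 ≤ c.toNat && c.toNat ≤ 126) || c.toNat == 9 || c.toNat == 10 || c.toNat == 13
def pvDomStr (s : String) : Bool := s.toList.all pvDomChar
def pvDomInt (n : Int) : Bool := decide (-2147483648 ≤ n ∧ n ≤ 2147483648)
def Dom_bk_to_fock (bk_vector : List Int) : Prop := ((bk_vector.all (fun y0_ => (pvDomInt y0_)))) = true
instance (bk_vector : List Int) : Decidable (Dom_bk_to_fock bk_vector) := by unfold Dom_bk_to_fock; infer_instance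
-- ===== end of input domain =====

-- B replaces A's per-qubit scan over all earlier modes by a running prefix-XOR array
-- (the parity set of qubit i is the contiguous block [(i+1)-lsb(i+1), i)); objective: faster.

-- ===== PORT A =====
def should_include_in_parity (qubit_idx fermion_idx : Int) : Bool :=
  let i := qubit_idx + 1
  let j := fermion_idx + 1
  if j > i then
    false
  else
    let rightmost_bit := PySem.Int.band i (-i)
    decide (i - rightmost_bit + 1 ≤ j ∧ j ≤ i)

def bk_to_fock (bk_vector : List Int) : List Int :=
  let n : Int := bk_vector.length
  let fock_vector : List Int := List.replicate bk_vector.length 0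
  (PySem.List.pyRange 0 n 1).foldl (fun fock_vector i =>
    let current_parity : Int :=
      (PySem.List.pyRange 0 i 1).foldl (fun current_parity j =>
        if should_include_in_parity i j then
          PySem.Int.bxor current_parity (PySem.List.pyGetD fock_vector j 0)
        else current_parity) 0
    PySem.List.pySetD fock_vector i
      (PySem.Int.bxor (PySem.List.pyGetD bk_vector i 0) current_parity)) fock_vector

-- ===== PORT B =====
def bk_to_fock_alt (bk_vector : List Int) : List Int :=
  ((PySem.List.enumerate bk_vector 0).foldl (fun st ib =>
      let i := ib.1
      let b := ib.2
      let m := i + 1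
      let lo := m - PySem.Int.band m (-m)
      let f := PySem.Int.bxor (PySem.Int.bxor b (PySem.List.pyGetD st.2 i 0))
                 (PySem.List.pyGetD st.2 lo 0)
      (st.1 ++ [f], st.2 ++ [PySem.Int.bxor (PySem.List.pyGetD st.2 i 0) f]))
    ([], [0])).1

-- ===== PRECONDITION & SPEC =====
def Spec_bk_to_fock (bk_vector : List Int) (out : List Int) : Prop := out = bk_to_fock_alt bk_vector
instance (bk_vector : List Int) (out : List Int) : Decidable (Spec_bk_to_fock bk_vector out) := by unfold Spec_bk_to_fock; infer_instance

-- ===== CLAIM (what is proved, stated in full; the proofs are below) =====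
def Claim_equal_bk_to_fock : Prop := ∀ (bk_vector : List Int), Dom_bk_to_fock bk_vector → Spec_bk_to_fock bk_vector (bk_to_fock bk_vector)

-- ===== LEMMAS AND PROOFS =====

-- Two's-complement view of an Int as (sign, low-bits magnitude); gives bxor associativity.
def pvEnc (a : Int) : Bool × Nat := if 0 ≤ a then (false, a.toNat) else (true, (-a - 1).toNat)
def pvDec (p : Bool × Nat) : Int := if p.1 then -(p.2 : Int) - 1 else (p.2 : Int)

theorem pvEnc_dec (p : Bool × Nat) : pvEnc (pvDec p) = p := by
  obtain ⟨b, m⟩ := p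
  unfold pvEnc pvDec
  cases b <;> simp
  omega

theorem bxor_eq_enc (a b : Int) :
    PySem.Int.bxor a b = pvDec (Bool.xor (pvEnc a).1 (pvEnc b).1, (pvEnc a).2 ^^^ (pvEnc b).2) := by
  unfold PySem.Int.bxor pvEnc pvDec
  by_cases ha : 0 ≤ a <;> by_cases hb : 0 ≤ b <;> simp [ha, hb]

theorem bxor_assoc (a b c : Int) :
    PySem.Int.bxor (PySem.Int.bxor a b) c = PySem.Int.bxor a (PySem.Int.bxor b c) := by
  simp only [bxor_eq_enc, pvEnc_dec]
  rw [Bool.xor_assoc, Nat.xor_assoc]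

theorem bxor_cancel_mid (a c d : Int) :
    PySem.Int.bxor (PySem.Int.bxor a (PySem.Int.bxor c d)) c = PySem.Int.bxor a d := by
  calc PySem.Int.bxor (PySem.Int.bxor a (PySem.Int.bxor c d)) c
      = PySem.Int.bxor a (PySem.Int.bxor (PySem.Int.bxor c d) c) := by rw [bxor_assoc]
    _ = PySem.Int.bxor a (PySem.Int.bxor d (PySem.Int.bxor c c)) := by
        rw [PySem.Int.bxor_comm c d, bxor_assoc, PySem.Int.bxor_comm c]
    _ = PySem.Int.bxor a d := by rw [PySem.Int.bxor_self, PySem.Int.bxor_zero]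

-- Python's  k & -k  for a positive k, written on Nat
theorem band_pos_neg (k : Nat) (hk : 1 ≤ k) :
    PySem.Int.band (k : Int) (-(k : Int)) = ((k - (k &&& (k - 1)) : Nat) : Int) := by
  unfold PySem.Int.band
  rw [if_pos (by positivity), if_neg (by omega)]
  have h1 : ((k : Int)).toNat = k := by simp
  have h2 : (-(-(k : Int)) - 1).toNat = k - 1 := by omega
  rw [h1, h2]

-- XOR of L[a..b) (pyGetD reads), the common meaning of both inner computations.
def xorAcc (L : List Int) (a b : Int) : Int :=
  (PySem.List.pyRange a b 1).foldl (fun p j => PySem.Int.bxor p (PySem.List.pyGetD L j 0)) 0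

-- the first k Fock values: entry i is bk[i] ^ XOR of fock[(i+1)&&&i .. i)
def fockPre (bk : List Int) : Nat → List Int
  | 0 => []
  | k+1 =>
    let L := fockPre bk k
    L ++ [PySem.Int.bxor (bk.getD k 0) (xorAcc L (((k+1) &&& k : Nat) : Int) (k : Int))]

theorem length_fockPre (bk : List Int) (k : Nat) : (fockPre bk k).length = k := by
  induction k with
  | zero => rfl
  | succ k ih => simp [fockPre, ih]

theorem foldl_bxor_init (g : Int → Int) (l : List Int) (init : Int) :
    l.foldl (fun p j => PySem.Int.bxor p (g j)) init
      = PySem.Int.bxor init (l.foldl (fun p j => PySem.Int.bxor p (g j)) 0) := by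
  induction l generalizing init with
  | nil => simp [PySem.Int.bxor_zero]
  | cons x xs ih =>
    simp only [List.foldl_cons]
    rw [ih, ih (PySem.Int.bxor 0 (g x))]
    rw [PySem.Int.bxor_comm 0 (g x), PySem.Int.bxor_zero, bxor_assoc]

theorem xorAcc_split (L : List Int) (a m b : Int) (h1 : a ≤ m) (h2 : m ≤ b) :
    xorAcc L a b = PySem.Int.bxor (xorAcc L a m) (xorAcc L m b) := by
  unfold xorAcc
  rw [PySem.List.pyRange_one_append a m b h1 h2, List.foldl_append, foldl_bxor_init]

theorem xorAcc_singleton (L : List Int) (a : Int) :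
    xorAcc L a (a + 1) = PySem.List.pyGetD L a 0 := by
  unfold xorAcc
  rw [PySem.List.pyRange_one_singleton]
  simp only [List.foldl_cons, List.foldl_nil]
  rw [PySem.Int.bxor_comm, PySem.Int.bxor_zero]

theorem xorAcc_congr (L L' : List Int) (a b : Int)
    (h : ∀ j : Int, a ≤ j → j < b → PySem.List.pyGetD L j 0 = PySem.List.pyGetD L' j 0) :
    xorAcc L a b = xorAcc L' a b := by
  unfold xorAcc
  apply PySem.List.foldl_congr_mem
  intro acc j hj
  rw [PySem.List.mem_pyRange_one] at hj
  rw [h j hj.1 hj.2]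

theorem getD_fockPre_mono (bk : List Int) (j k K : Nat) (hjk : j < k) (hkK : k ≤ K) :
    (fockPre bk K).getD j 0 = (fockPre bk k).getD j 0 := by
  induction K with
  | zero => omega
  | succ K ih =>
    rcases Nat.lt_or_ge K k with h | h
    · have : k = K + 1 := by omega
      subst this; rfl
    · rw [← ih h]
      show ((fockPre bk K) ++ _).getD j 0 = _
      rw [List.getD_append _ _ _ _ (by rw [length_fockPre]; omega)]

theorem pyGetD_fockPre (bk : List Int) (k K : Nat) (j : Int) (_h0 : 0 ≤ j) (hk : j < (k : Int)) (hkK : k ≤ K) :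
    PySem.List.pyGetD (fockPre bk K) j 0 = PySem.List.pyGetD (fockPre bk k) j 0 := by
  have hj : j = ((j.toNat : Nat) : Int) := by omega
  rw [hj, PySem.List.pyGetD_natCast, PySem.List.pyGetD_natCast]
  exact getD_fockPre_mono bk j.toNat k K (by omega) hkK

-- A's membership test, on the indices the inner loop feeds it, is the contiguous-range test
theorem cond_eq (k : Nat) (j : Int) (h0 : 0 ≤ j) (hk : j < (k : Int)) :
    should_include_in_parity (k : Int) j = decide ((((k+1) &&& k : Nat) : Int) ≤ j) := by
  unfold should_include_in_parity
  rw [if_neg (by omega)]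
  have e : (k : Int) + 1 = ((k + 1 : Nat) : Int) := by push_cast; ring
  rw [e, band_pos_neg (k+1) (by omega)]
  have hc : (k+1) &&& k ≤ k := Nat.and_le_right
  have h2 : (k + 1) - 1 = k := by omega
  rw [h2]
  rw [decide_eq_decide]
  omega

-- prefix value P m = XOR of fock[0..m)
def prefVal (bk : List Int) (m : Nat) : Int := xorAcc (fockPre bk m) (0 : Int) (m : Int)

theorem prefVal_stable (bk : List Int) (m K : Nat) (h : m ≤ K) :
    prefVal bk m = xorAcc (fockPre bk K) (0 : Int) (m : Int) := by
  unfold prefVal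
  apply xorAcc_congr
  intro j hj0 hjm
  exact (pyGetD_fockPre bk m K j hj0 hjm h).symm

-- ===== the A-side invariant =====
theorem A_invariant (bk : List Int) (k : Nat) (hk : k ≤ bk.length) :
    (PySem.List.pyRange 0 (k : Int) 1).foldl (fun fock_vector i =>
      let current_parity : Int :=
        (PySem.List.pyRange 0 i 1).foldl (fun current_parity j =>
          if should_include_in_parity i j then
            PySem.Int.bxor current_parity (PySem.List.pyGetD fock_vector j 0)
          else current_parity) 0
      PySem.List.pySetD fock_vector i
        (PySem.Int.bxor (PySem.List.pyGetD bk i 0) current_parity))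
      (List.replicate bk.length 0)
    = fockPre bk k ++ List.replicate (bk.length - k) 0 := by
  induction k with
  | zero =>
    rw [PySem.List.pyRange_one_eq_nil (by simp)]
    rfl
  | succ k ih =>
    have hk' : k ≤ bk.length := by omega
    have e : ((k + 1 : Nat) : Int) = (k : Int) + 1 := by push_cast; ring
    rw [e, PySem.List.pyRange_one_succ_right (by positivity), List.foldl_append,
        ih hk']
    simp only [List.foldl_cons, List.foldl_nil]
    have hc : (k+1) &&& k ≤ k := Nat.and_le_right
    set S := fockPre bk k ++ List.replicate (bk.length - k) 0 with hS
    have hget : ∀ j : Int, 0 ≤ j → j < (k : Int) →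
        PySem.List.pyGetD S j 0 = PySem.List.pyGetD (fockPre bk k) j 0 := by
      intro j h0 hj
      have hj' : j = ((j.toNat : Nat) : Int) := by omega
      rw [hj', PySem.List.pyGetD_natCast, PySem.List.pyGetD_natCast, hS,
          List.getD_append _ _ _ _ (by rw [length_fockPre]; omega)]
    have hparity :
        (PySem.List.pyRange 0 (k : Int) 1).foldl (fun p j =>
            if should_include_in_parity (k : Int) j then PySem.Int.bxor p (PySem.List.pyGetD S j 0) else p) 0
          = xorAcc (fockPre bk k) (((k+1) &&& k : Nat) : Int) (k : Int) := by
      rw [PySem.List.foldl_congr_mem _ _ (fun p j =>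
            if (((k+1) &&& k : Nat) : Int) ≤ j then PySem.Int.bxor p (PySem.List.pyGetD S j 0) else p) _
          (by
            intro acc j hj
            rw [PySem.List.mem_pyRange_one] at hj
            rw [cond_eq k j hj.1 hj.2]
            simp)]
      rw [PySem.List.pyRange_one_append 0 (((k+1) &&& k : Nat) : Int) (k : Int)
            (by positivity) (by exact_mod_cast hc), List.foldl_append]
      rw [PySem.List.foldl_congr_mem (PySem.List.pyRange 0 (((k+1) &&& k : Nat) : Int) 1) _ (fun p _ => p) _
          (by
            intro acc j hj
            rw [PySem.List.mem_pyRange_one] at hj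
            rw [if_neg (by omega)])]
      rw [List.foldl_fixed]
      rw [PySem.List.foldl_congr_mem (PySem.List.pyRange (((k+1) &&& k : Nat) : Int) (k : Int) 1) _
            (fun p j => PySem.Int.bxor p (PySem.List.pyGetD S j 0)) _
          (by
            intro acc j hj
            rw [PySem.List.mem_pyRange_one] at hj
            rw [if_pos hj.1])]
      show xorAcc S (((k+1) &&& k : Nat) : Int) (k : Int) = _
      exact xorAcc_congr S _ _ _ (fun j h1 h2 => hget j (le_trans (by positivity) h1) h2)
    rw [hparity, PySem.List.pyGetD_natCast bk, PySem.List.pySetD_natCast]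
    rw [hS, List.set_append, if_neg (by rw [length_fockPre]; omega), length_fockPre,
        Nat.sub_self]
    have hrep : bk.length - k = (bk.length - (k+1)) + 1 := by omega
    rw [hrep, List.replicate_succ, List.set_cons_zero]
    simp [fockPre]

-- ===== the B-side invariant =====
theorem B_invariant (bk : List Int) (k : Nat) (hk : k ≤ bk.length) :
    (PySem.List.pyRange 0 (k : Int) 1).foldl (fun st i =>
      let b := PySem.List.pyGetD bk i 0
      let m := i + 1
      let lo := m - PySem.Int.band m (-m)
      let f := PySem.Int.bxor (PySem.Int.bxor b (PySem.List.pyGetD st.2 i 0))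
                 (PySem.List.pyGetD st.2 lo 0)
      (st.1 ++ [f], st.2 ++ [PySem.Int.bxor (PySem.List.pyGetD st.2 i 0) f]))
      (([], [0]) : List Int × List Int)
    = (fockPre bk k, (List.range (k + 1)).map (prefVal bk)) := by
  induction k with
  | zero =>
    rw [PySem.List.pyRange_one_eq_nil (by simp)]
    simp [fockPre, prefVal, xorAcc, PySem.List.pyRange_one_eq_nil]
  | succ k ih =>
    have hk' : k ≤ bk.length := by omega
    have e : ((k + 1 : Nat) : Int) = (k : Int) + 1 := by push_cast; ring
    rw [e, PySem.List.pyRange_one_succ_right (by positivity), List.foldl_append,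
        ih hk']
    simp only [List.foldl_cons, List.foldl_nil]
    have hc : (k+1) &&& k ≤ k := Nat.and_le_right
    have hgetk : PySem.List.pyGetD ((List.range (k+1)).map (prefVal bk)) (k : Int) 0
        = prefVal bk k := by
      rw [PySem.List.pyGetD_natCast, PySem.List.getD_map_range _ _ _ _ (by omega)]
    have hlo : ((k : Int) + 1) - PySem.Int.band ((k : Int) + 1) (-((k : Int) + 1))
        = (((k+1) &&& k : Nat) : Int) := by
      have e2 : (k : Int) + 1 = ((k + 1 : Nat) : Int) := by push_cast; ring
      rw [e2, band_pos_neg (k+1) (by omega)]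
      have h2 : (k + 1) - 1 = k := by omega
      rw [h2]
      have h3 : (k+1) &&& k ≤ k + 1 := Nat.and_le_left
      omega
    have hgetlo : PySem.List.pyGetD ((List.range (k+1)).map (prefVal bk)) (((k+1) &&& k : Nat) : Int) 0
        = prefVal bk ((k+1) &&& k) := by
      rw [PySem.List.pyGetD_natCast, PySem.List.getD_map_range _ _ _ _ (by omega)]
    have hf : PySem.Int.bxor (PySem.Int.bxor (bk.getD k 0) (prefVal bk k))
          (prefVal bk ((k+1) &&& k))
        = PySem.Int.bxor (bk.getD k 0) (xorAcc (fockPre bk k) (((k+1) &&& k : Nat) : Int) (k : Int)) := by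
      rw [prefVal_stable bk ((k+1) &&& k) k (by omega)]
      have hsplit : prefVal bk k
          = PySem.Int.bxor (xorAcc (fockPre bk k) 0 (((k+1) &&& k : Nat) : Int))
              (xorAcc (fockPre bk k) (((k+1) &&& k : Nat) : Int) (k : Int)) := by
        unfold prefVal
        exact xorAcc_split _ _ _ _ (by positivity) (by exact_mod_cast hc)
      rw [hsplit]
      exact bxor_cancel_mid _ _ _
    have hentry : PySem.List.pyGetD (fockPre bk (k+1)) (k : Int) 0
        = PySem.Int.bxor (bk.getD k 0) (xorAcc (fockPre bk k) (((k+1) &&& k : Nat) : Int) (k : Int)) := by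
      rw [PySem.List.pyGetD_natCast]
      show ((fockPre bk k) ++ _).getD k 0 = _
      rw [List.getD_append_right _ _ _ _ (by rw [length_fockPre]), length_fockPre, Nat.sub_self]
      rfl
    have hp : PySem.Int.bxor (prefVal bk k)
          (PySem.Int.bxor (bk.getD k 0) (xorAcc (fockPre bk k) (((k+1) &&& k : Nat) : Int) (k : Int)))
        = prefVal bk (k+1) := by
      have e3 : ((k + 1 : Nat) : Int) = (k : Int) + 1 := by push_cast; ring
      unfold prefVal
      rw [e3, xorAcc_split (fockPre bk (k+1)) 0 (k : Int) ((k : Int) + 1) (by positivity) (by omega)]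
      rw [xorAcc_singleton, hentry]
      rw [← prefVal_stable bk k (k+1) (by omega)]
      rfl
    rw [hlo, hgetk, hgetlo, PySem.List.pyGetD_natCast bk, hf]
    simp only [Prod.mk.injEq]
    constructor
    · simp [fockPre]
    · rw [hp]
      simp [List.range_succ]

-- ===== VERDICT (by name: the statement is the Claim_ definition above) =====
theorem bk_to_fock_spec : Claim_equal_bk_to_fock := by
  intro bk _
  unfold Spec_bk_to_fock
  have hA : bk_to_fock bk = fockPre bk bk.length ++ List.replicate (bk.length - bk.length) 0 :=
    A_invariant bk bk.length le_rfl
  rw [Nat.sub_self, List.replicate_zero, List.append_nil] at hA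
  have hB := B_invariant bk bk.length le_rfl
  have hB1 : bk_to_fock_alt bk = fockPre bk bk.length := by
    unfold bk_to_fock_alt
    rw [PySem.List.enumerate_eq_map_pyRange bk 0, List.foldl_map]
    exact congrArg Prod.fst hB
  rw [hA, hB1]
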